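-- pv_equiv track=rewrite | github.com/olimiemma/ARC-Prize-2025-Kaggle-ARC-AGI-2-Benchmark- | arc_prize_2025_submission/versions/arc_solver_v3.py | fit_palette_only
-- ===== SOURCE A (Python) =====
-- from typing import Any, Dict, List, Tuple, Optional, Deque
--
-- Grid = List[List[int]]
--
-- def dims(g: Grid) -> Tuple[int, int]:
--     return (len(g), len(g[0]) if g else 0)
--
-- PaletteMap = Dict[int, int]
--
-- def infer_bijective_palette_map(src: Grid, dst: Grid) -> Optional[PaletteMap]:
--     # already defined above; duplicating name for clarity in this scope
--     if dims(src) != dims(dst):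
--         return None
--     mapping: Dict[int, int] = {}
--     inverse: Dict[int, int] = {}
--     h, w = dims(src)
--     for r in range(h):
--         for c in range(w):
--             s, d = src[r][c], dst[r][c]
--             if s in mapping and mapping[s] != d:
--                 return None
--             if d in inverse and inverse[d] != s:
--                 return None
--             mapping[s] = d
--             inverse[d] = s
--     return mapping
--
-- def merge_palette_maps(global_map: PaletteMap, local_map: PaletteMap) -> Optional[PaletteMap]:
--     merged = dict(global_map)
--     inv: Dict[int, int] = {v: k for k, v in merged.items()}
--     for k, v in local_map.items():
--         if k in merged and merged[k] != v:
--             return None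
--         if v in inv and inv[v] != k:
--             return None
--         merged[k] = v
--         inv[v] = k
--     return merged
--
-- def fit_palette_only(train_pairs: List[Tuple[Grid, Grid]]) -> Optional[PaletteMap]:
--     global_map: PaletteMap = {}
--     for src, dst in train_pairs:
--         local = infer_bijective_palette_map(src, dst)
--         if local is None:
--             return None
--         merged = merge_palette_maps(global_map, local)
--         if merged is None:
--             return None
--         global_map = merged
--     return global_map
-- ===== SOURCE B (Python) =====
-- def fit_palette_only(train_pairs):
--     # Gather all cell correspondences into forward/backward multimaps, then validate once.
--     forward = {}
--     backward = {}
--     for src, dst in train_pairs: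
--         if (len(src), len(src[0]) if src else 0) != (len(dst), len(dst[0]) if dst else 0):
--             return None
--         h = len(src)
--         w = len(src[0]) if src else 0
--         for r in range(h):
--             for c in range(w):
--                 s = src[r][c]
--                 d = dst[r][c]
--                 forward.setdefault(s, set()).add(d)
--                 backward.setdefault(d, set()).add(s)
--     if any(len(v) > 1 for v in forward.values()) or any(len(v) > 1 for v in backward.values()):
--         return None
--     return {s: next(iter(v)) for s, v in forward.items()}
-- ===== Notes on version B (the rewrite author's own statement) =====
-- stated objective: alternative
-- what changed: Instead of A's per-pair bijection inference followed by merging into a running global bijection with early rejection, B makes one gather pass recording every cell correspondence in forward/backward multimaps (dicts of sets) and validates functionality/injectivity in a single final pass before collapsing the singleton sets to the answer.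
import Mathlib
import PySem

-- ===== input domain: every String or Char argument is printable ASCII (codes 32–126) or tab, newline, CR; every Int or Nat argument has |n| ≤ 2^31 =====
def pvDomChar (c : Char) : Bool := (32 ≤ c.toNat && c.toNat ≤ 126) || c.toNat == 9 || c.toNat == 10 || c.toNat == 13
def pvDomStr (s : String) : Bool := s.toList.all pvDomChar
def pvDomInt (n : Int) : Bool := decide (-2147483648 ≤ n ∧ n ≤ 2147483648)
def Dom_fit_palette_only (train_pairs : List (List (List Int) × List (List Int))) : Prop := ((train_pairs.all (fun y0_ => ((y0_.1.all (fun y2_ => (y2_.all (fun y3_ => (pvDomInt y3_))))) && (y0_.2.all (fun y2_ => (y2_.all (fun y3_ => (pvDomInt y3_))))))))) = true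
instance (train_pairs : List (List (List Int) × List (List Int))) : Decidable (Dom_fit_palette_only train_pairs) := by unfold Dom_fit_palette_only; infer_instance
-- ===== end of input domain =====

-- B replaces A's per-pair bijection + merge with one gather pass into forward/backward
-- multimaps validated once at the end (objective: alternative decomposition, same cost).

-- ===== PORT A =====

-- dims(g) = (len(g), len(g[0]) if g else 0)
def pvDims (g : List (List Int)) : Int × Int :=
  (PySem.List.len g, match g with | [] => 0 | r :: _ => PySem.List.len r)

-- g[r][c]; total form (defaults), exact under Pre_ (all accessed indices are in range)
def pvCell (g : List (List Int)) (r c : Int) : Int :=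
  PySem.List.pyGetD (PySem.List.pyGetD g r []) c 0

-- the shared loop body of A's infer and merge: the two conflict checks, then
-- mapping[s] = d ; inverse[d] = s
def pvStepA (st : PySem.Dict Int Int × PySem.Dict Int Int) (s d : Int) :
    Option (PySem.Dict Int Int × PySem.Dict Int Int) :=
  if (match st.1.get? s with | some v => v != d | none => false) then none
  else if (match st.2.get? d with | some u => u != s | none => false) then none
  else some (st.1.insert s d, st.2.insert d s)

def infer_bijective_palette_map (src dst : List (List Int)) :
    Option (PySem.Dict Int Int) :=
  if pvDims src ≠ pvDims dst then none
  else
    ((PySem.List.pyRange 0 (pvDims src).1 1).foldl (fun acc r =>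
        (PySem.List.pyRange 0 (pvDims src).2 1).foldl (fun acc2 c =>
          acc2.bind (fun st => pvStepA st (pvCell src r c) (pvCell dst r c))) acc)
      (some (PySem.Dict.empty, PySem.Dict.empty))).map (fun st => st.1)

-- inv = {v: k for k, v in merged.items()}
def pvInvOf (g : PySem.Dict Int Int) : PySem.Dict Int Int :=
  g.items.foldl (fun inv p => inv.insert p.2 p.1) PySem.Dict.empty

def merge_palette_maps (g l : PySem.Dict Int Int) : Option (PySem.Dict Int Int) :=
  (l.items.foldl (fun acc p => acc.bind (fun st => pvStepA st p.1 p.2))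
      (some (g, pvInvOf g))).map (fun st => st.1)

def fit_palette_only (train_pairs : List (List (List Int) × List (List Int))) :
    Option (List (Int × Int)) :=
  (train_pairs.foldl (fun acc p =>
      acc.bind (fun g =>
        match infer_bijective_palette_map p.1 p.2 with
        | none => none
        | some l => merge_palette_maps g l))
    (some PySem.Dict.empty)).map (fun g => g.items)

-- ===== PORT B =====

-- forward.setdefault(s, set()).add(d) ; backward.setdefault(d, set()).add(s)
def pvMMStep (fb : PySem.Dict Int (PySem.Set Int) × PySem.Dict Int (PySem.Set Int))
    (s d : Int) :
    PySem.Dict Int (PySem.Set Int) × PySem.Dict Int (PySem.Set Int) :=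
  (fb.1.modify s [] (fun S => PySem.Set.add S d),
   fb.2.modify d [] (fun S => PySem.Set.add S s))

def fit_palette_only_alt (train_pairs : List (List (List Int) × List (List Int))) :
    Option (List (Int × Int)) :=
  match train_pairs.foldl (fun acc p =>
      acc.bind (fun fb =>
        if pvDims p.1 ≠ pvDims p.2 then none
        else some ((PySem.List.pyRange 0 (pvDims p.1).1 1).foldl (fun fb2 r =>
            (PySem.List.pyRange 0 (pvDims p.1).2 1).foldl (fun fb3 c =>
              pvMMStep fb3 (pvCell p.1 r c) (pvCell p.2 r c)) fb2) fb)))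
    (some (PySem.Dict.empty, PySem.Dict.empty)) with
  | none => none
  | some fb =>
    if fb.1.values.any (fun v => 1 < v.length) || fb.2.values.any (fun v => 1 < v.length)
    then none
    else some (fb.1.items.map (fun p => (p.1, p.2.headD 0)))

-- ===== PRECONDITION & SPEC =====

-- Pre_ excludes ragged grids: a dims-matching pair that is not preceded by any
-- dims-mismatched pair and has a row shorter than its first source row makes the
-- row-major scan raise IndexError (in A, or in B, which keeps scanning pairs past
-- the point where A already returned None on a conflict).
def pvRowsOk (p : List (List Int) × List (List Int)) : Prop :=
  pvDims p.1 = pvDims p.2 →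
    (∀ row ∈ p.1, (pvDims p.1).2 ≤ PySem.List.len row) ∧
    (∀ row ∈ p.2, (pvDims p.1).2 ≤ PySem.List.len row)

def Pre_fit_palette_only (train_pairs : List (List (List Int) × List (List Int))) : Prop :=
  ∀ i, i < train_pairs.length →
    (∀ j, j < i → pvDims (train_pairs.getD j ([], [])).1
      = pvDims (train_pairs.getD j ([], [])).2) →
    pvRowsOk (train_pairs.getD i ([], []))

instance (train_pairs : List (List (List Int) × List (List Int))) :
    Decidable (Pre_fit_palette_only train_pairs) := by
  unfold Pre_fit_palette_only pvRowsOk; infer_instance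

def pvWitness_fit_palette_only : (List (List (List Int) × List (List Int))) :=
  [([[1, 2]], [[3, 4]]), ([[2, 1]], [[4, 3]])]

def Spec_fit_palette_only (train_pairs : List (List (List Int) × List (List Int)))
    (out : Option (List (Int × Int))) : Prop := out = fit_palette_only_alt train_pairs
instance (train_pairs : List (List (List Int) × List (List Int)))
    (out : Option (List (Int × Int))) : Decidable (Spec_fit_palette_only train_pairs out) := by
  unfold Spec_fit_palette_only; infer_instance

-- ===== CLAIM (what is proved, stated in full; the proofs are below) =====
def Claim_equal_fit_palette_only : Prop :=
  ∀ (train_pairs : List (List (List Int) × List (List Int))),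
    Dom_fit_palette_only train_pairs → Pre_fit_palette_only train_pairs →
      Spec_fit_palette_only train_pairs (fit_palette_only train_pairs)

-- ===== LEMMAS AND PROOFS =====

-- A's cell loop and merge loop, over an explicit stream of (source, destination) pairs
def pvA (ps : List (Int × Int))
    (o : Option (PySem.Dict Int Int × PySem.Dict Int Int)) :
    Option (PySem.Dict Int Int × PySem.Dict Int Int) :=
  ps.foldl (fun o c => o.bind (fun st => pvStepA st c.1 c.2)) o

-- B's multimap accumulation over a stream
def pvM (ps : List (Int × Int))
    (fb : PySem.Dict Int (PySem.Set Int) × PySem.Dict Int (PySem.Set Int)) :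
    PySem.Dict Int (PySem.Set Int) × PySem.Dict Int (PySem.Set Int) :=
  ps.foldl (fun fb c => pvMMStep fb c.1 c.2) fb

def pvE : PySem.Dict Int (PySem.Set Int) × PySem.Dict Int (PySem.Set Int) :=
  (PySem.Dict.empty, PySem.Dict.empty)

-- collapse a validated multimap to a map (each value set is a singleton)
def pvSq (f : PySem.Dict Int (PySem.Set Int)) : PySem.Dict Int Int :=
  ⟨f.items.map (fun p => (p.1, p.2.headD 0))⟩

def pvOkB (fb : PySem.Dict Int (PySem.Set Int) × PySem.Dict Int (PySem.Set Int)) : Bool :=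
  !(fb.1.values.any (fun v => 1 < v.length) || fb.2.values.any (fun v => 1 < v.length))

def pvAbs (fb : PySem.Dict Int (PySem.Set Int) × PySem.Dict Int (PySem.Set Int)) :
    Option (PySem.Dict Int Int × PySem.Dict Int Int) :=
  if pvOkB fb then some (pvSq fb.1, pvSq fb.2) else none

def pvAbsF (ps : List (Int × Int)) : Option (PySem.Dict Int Int) :=
  (pvAbs (pvM ps pvE)).map (fun st => st.1)

def pvPost (o : Option (PySem.Dict Int (PySem.Set Int) × PySem.Dict Int (PySem.Set Int))) :
    Option (PySem.Dict Int Int) :=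
  o.bind (fun fb => if pvOkB fb then some (pvSq fb.1) else none)

-- the row-major stream of cell correspondences of one pair
def pvCells (src dst : List (List Int)) : List (Int × Int) :=
  (PySem.List.pyRange 0 (pvDims src).1 1).flatMap (fun r =>
    (PySem.List.pyRange 0 (pvDims src).2 1).map (fun c => (pvCell src r c, pvCell dst r c)))

def pvWFd (f : PySem.Dict Int (PySem.Set Int)) : Prop :=
  f.keys.Nodup ∧ ∀ S ∈ f.values, S ≠ [] ∧ S.Nodup

def pvWF (fb : PySem.Dict Int (PySem.Set Int) × PySem.Dict Int (PySem.Set Int)) : Prop :=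
  pvWFd fb.1 ∧ pvWFd fb.2

def pvInj (f : PySem.Dict Int (PySem.Set Int)) : Prop :=
  ∀ s x y, x ∈ f.getD s [] → y ∈ f.getD s [] → x = y

-- outer loop steps
def pvStepAO (acc : Option (PySem.Dict Int Int))
    (p : List (List Int) × List (List Int)) : Option (PySem.Dict Int Int) :=
  acc.bind (fun g =>
    match infer_bijective_palette_map p.1 p.2 with
    | none => none
    | some l => merge_palette_maps g l)

def pvStepBO
    (acc : Option (PySem.Dict Int (PySem.Set Int) × PySem.Dict Int (PySem.Set Int)))
    (p : List (List Int) × List (List Int)) :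
    Option (PySem.Dict Int (PySem.Set Int) × PySem.Dict Int (PySem.Set Int)) :=
  acc.bind (fun fb =>
    if pvDims p.1 ≠ pvDims p.2 then none else some (pvM (pvCells p.1 p.2) fb))

-- basic fold facts
lemma pvA_none (ps : List (Int × Int)) : pvA ps none = none := by
  induction ps with
  | nil => rfl
  | cons c ps ih => simpa [pvA] using ih

lemma pvA_append (ps qs : List (Int × Int))
    (o : Option (PySem.Dict Int Int × PySem.Dict Int Int)) :
    pvA (ps ++ qs) o = pvA qs (pvA ps o) := by
  simp [pvA, List.foldl_append]

lemma pvM_append (ps qs : List (Int × Int))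
    (fb : PySem.Dict Int (PySem.Set Int) × PySem.Dict Int (PySem.Set Int)) :
    pvM (ps ++ qs) fb = pvM qs (pvM ps fb) := by
  simp [pvM, List.foldl_append]

-- well-formedness of the multimaps
lemma value_getD (f : PySem.Dict Int (PySem.Set Int)) (hnd : f.keys.Nodup)
    (S : PySem.Set Int) (hS : S ∈ f.values) : ∃ s, f.getD s [] = S := by
  simp only [PySem.Dict.values, List.mem_map] at hS
  obtain ⟨p, hp, hpS⟩ := hS
  refine ⟨p.1, ?_⟩
  have := PySem.Dict.get?_of_mem_items f (k := p.1) (v := p.2) (by simpa using hp) hnd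
  simp [PySem.Dict.getD_eq_get?_getD, this, hpS]

lemma getD_value (f : PySem.Dict Int (PySem.Set Int)) (s : Int)
    (h : f.getD s [] ≠ []) : f.getD s [] ∈ f.values := by
  cases hg : f.get? s with
  | none => simp [PySem.Dict.getD_eq_get?_getD, hg] at h
  | some S =>
    have hm := PySem.Dict.mem_items_of_get?_eq_some (d := f) hg
    simp only [PySem.Dict.values, List.mem_map, PySem.Dict.getD_eq_get?_getD, hg, Option.getD_some]
    exact ⟨(s, S), hm, rfl⟩

lemma add_ne_nil (S : PySem.Set Int) (x : Int) : PySem.Set.add S x ≠ [] := by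
  by_cases hx : x ∈ S
  · rw [PySem.Set.add_of_mem hx]; exact List.ne_nil_of_mem hx
  · rw [PySem.Set.add_of_not_mem hx]; simp

lemma wf_mmStep (fb : PySem.Dict Int (PySem.Set Int) × PySem.Dict Int (PySem.Set Int))
    (s d : Int) (h : pvWF fb) : pvWF (pvMMStep fb s d) := by
  obtain ⟨⟨h1k, h1v⟩, h2k, h2v⟩ := h
  have comp : ∀ (f : PySem.Dict Int (PySem.Set Int)) (a b : Int), pvWFd f →
      pvWFd (f.modify a [] (fun S => PySem.Set.add S b)) := by
    intro f a b ⟨hk, hv⟩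
    constructor
    · simpa [PySem.Dict.modify] using PySem.Dict.nodup_keys_insert _ _ _ hk
    · intro S hS
      simp only [PySem.Dict.modify] at hS
      rcases PySem.Dict.mem_values_insert _ _ _ _ hS with hEq | hOld
      · subst hEq
        have hbase : (f.getD a []).Nodup := by
          by_cases hn : f.getD a [] = []
          · simp [hn]
          · exact (hv _ (getD_value f a hn)).2
        exact ⟨add_ne_nil _ _, PySem.Set.nodup_add _ _ hbase⟩
      · exact hv _ hOld
  exact ⟨comp _ _ _ ⟨h1k, h1v⟩, comp _ _ _ ⟨h2k, h2v⟩⟩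

lemma wf_mm (ps : List (Int × Int)) : pvWF (pvM ps pvE) := by
  have : ∀ fb, pvWF fb → pvWF (pvM ps fb) := by
    induction ps with
    | nil => intro fb h; exact h
    | cons c ps ih => intro fb h; exact ih _ (wf_mmStep fb c.1 c.2 h)
  exact this pvE ⟨⟨by simp [pvE, PySem.Dict.keys, PySem.Dict.empty], by simp [pvE, PySem.Dict.values, PySem.Dict.empty]⟩,
    ⟨by simp [pvE, PySem.Dict.keys, PySem.Dict.empty], by simp [pvE, PySem.Dict.values, PySem.Dict.empty]⟩⟩

-- membership characterization of the multimaps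
lemma getD_mmStep1 (fb : PySem.Dict Int (PySem.Set Int) × PySem.Dict Int (PySem.Set Int))
    (a b s : Int) :
    (pvMMStep fb a b).1.getD s [] =
      if s = a then PySem.Set.add (fb.1.getD a []) b else fb.1.getD s [] := by
  simp [pvMMStep, PySem.Dict.getD_modify]

lemma getD_mmStep2 (fb : PySem.Dict Int (PySem.Set Int) × PySem.Dict Int (PySem.Set Int))
    (a b t : Int) :
    (pvMMStep fb a b).2.getD t [] =
      if t = b then PySem.Set.add (fb.2.getD b []) a else fb.2.getD t [] := by
  simp [pvMMStep, PySem.Dict.getD_modify]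

lemma mem_mm1 (ps : List (Int × Int))
    (fb : PySem.Dict Int (PySem.Set Int) × PySem.Dict Int (PySem.Set Int)) (s x : Int) :
    x ∈ (pvM ps fb).1.getD s [] ↔ x ∈ fb.1.getD s [] ∨ (s, x) ∈ ps := by
  induction ps generalizing fb with
  | nil => simp [pvM]
  | cons c ps ih =>
    have : pvM (c :: ps) fb = pvM ps (pvMMStep fb c.1 c.2) := rfl
    rw [this, ih, getD_mmStep1]
    by_cases hs : s = c.1
    · subst hs
      rw [if_pos rfl]
      simp only [PySem.Set.mem_add, List.mem_cons, Prod.ext_iff]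
      tauto
    · rw [if_neg hs]
      simp only [List.mem_cons, Prod.ext_iff]
      tauto

lemma mem_mm2 (ps : List (Int × Int))
    (fb : PySem.Dict Int (PySem.Set Int) × PySem.Dict Int (PySem.Set Int)) (t x : Int) :
    x ∈ (pvM ps fb).2.getD t [] ↔ x ∈ fb.2.getD t [] ∨ (x, t) ∈ ps := by
  induction ps generalizing fb with
  | nil => simp [pvM]
  | cons c ps ih =>
    have : pvM (c :: ps) fb = pvM ps (pvMMStep fb c.1 c.2) := rfl
    rw [this, ih, getD_mmStep2]
    by_cases ht : t = c.2
    · subst ht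
      rw [if_pos rfl]
      simp only [PySem.Set.mem_add, List.mem_cons, Prod.ext_iff]
      tauto
    · rw [if_neg ht]
      simp only [List.mem_cons, Prod.ext_iff]
      tauto

-- getD / values bridges
lemma okB_iff (fb : PySem.Dict Int (PySem.Set Int) × PySem.Dict Int (PySem.Set Int))
    (h : pvWF fb) : pvOkB fb = true ↔ pvInj fb.1 ∧ pvInj fb.2 := by
  have comp : ∀ (f : PySem.Dict Int (PySem.Set Int)), pvWFd f →
      ((∀ S ∈ f.values, ¬ 1 < S.length) ↔ pvInj f) := by
    intro f ⟨hk, hv⟩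
    constructor
    · intro hlen s x y hx hy
      have hne : f.getD s [] ≠ [] := List.ne_nil_of_mem hx
      have hlen1 := hlen _ (getD_value f s hne)
      cases hl : f.getD s [] with
      | nil => simp [hl] at hx
      | cons a l2 =>
        rw [hl] at hlen1 hx hy
        have : l2 = [] := by
          cases l2 with
          | nil => rfl
          | cons b t => simp at hlen1
        subst this
        simp at hx hy
        rw [hx, hy]
    · intro hinj S hS
      obtain ⟨s, hgs⟩ := value_getD f hk S hS
      have hnd := (hv S hS).2
      cases S with
      | nil => simp
      | cons a l2 =>
        cases l2 with
        | nil => simp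
        | cons b t =>
          exfalso
          have hab : a ≠ b := by simp at hnd; tauto
          exact hab (hinj s a b (by rw [hgs]; simp) (by rw [hgs]; simp))
  have h1 := comp fb.1 h.1
  have h2 := comp fb.2 h.2
  simp only [pvOkB, Bool.not_eq_eq_eq_not, Bool.not_true, Bool.or_eq_false_iff,
    List.any_eq_false, decide_eq_true_eq]
  constructor
  · intro ⟨a, b⟩; exact ⟨h1.mp a, h2.mp b⟩
  · intro ⟨a, b⟩; exact ⟨h1.mpr a, h2.mpr b⟩

lemma ok_mono_mem (qs rs : List (Int × Int)) (hsub : ∀ c ∈ qs, c ∈ rs)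
    (h : pvOkB (pvM rs pvE) = true) : pvOkB (pvM qs pvE) = true := by
  rw [okB_iff _ (wf_mm rs)] at h
  rw [okB_iff _ (wf_mm qs)]
  have hE1 : ∀ s : Int, (pvE.1.getD s []) = [] := by
    intro s; simp [pvE, PySem.Dict.getD_eq_get?_getD, PySem.Dict.get?_empty]
  have hE2 : ∀ s : Int, (pvE.2.getD s []) = [] := by
    intro s; simp [pvE, PySem.Dict.getD_eq_get?_getD, PySem.Dict.get?_empty]
  constructor
  · intro s x y hx hy
    rw [mem_mm1, hE1] at hx hy
    exact h.1 s x y (by rw [mem_mm1, hE1]; simp at hx ⊢; exact hsub _ hx)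
      (by rw [mem_mm1, hE1]; simp at hy ⊢; exact hsub _ hy)
  · intro t x y hx hy
    rw [mem_mm2, hE2] at hx hy
    exact h.2 t x y (by rw [mem_mm2, hE2]; simp at hx ⊢; exact hsub _ hx)
      (by rw [mem_mm2, hE2]; simp at hy ⊢; exact hsub _ hy)

-- squash facts
lemma sq_get? (f : PySem.Dict Int (PySem.Set Int)) (s : Int) :
    (pvSq f).get? s = (f.get? s).map (fun S => S.headD 0) := by
  simp [pvSq, PySem.Dict.get?, List.find?_map, Option.map_map, Function.comp_def]

lemma sq_keys (f : PySem.Dict Int (PySem.Set Int)) : (pvSq f).keys = f.keys := by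
  simp [pvSq, PySem.Dict.keys, List.map_map, Function.comp_def]

lemma insert_same {ν : Type} (d : PySem.Dict Int ν) (k : Int) (v : ν)
    (hnd : d.keys.Nodup) (hv : d.get? k = some v) : d.insert k v = d := by
  have hc : d.contains k = true := by rw [PySem.Dict.contains_eq_isSome_get?, hv]; rfl
  apply PySem.Dict.ext
  rw [PySem.Dict.items_insert_of_contains _ _ hc]
  have : ∀ p ∈ d.items, (if (p.1 == k) = true then (k, v) else p) = p := by
    intro p hp
    by_cases hb : (p.1 == k) = true
    · have hk : p.1 = k := by simpa using hb
      subst hk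
      have := PySem.Dict.get?_of_mem_items d (k := p.1) (v := p.2) (by simpa using hp) hnd
      rw [hv] at this
      have hv2 : v = p.2 := by injection this
      simp [hv2]
    · simp [hb]
  rw [List.map_congr_left this]
  simp

lemma modify_same (f : PySem.Dict Int (PySem.Set Int)) (s d : Int)
    (hnd : f.keys.Nodup) (h : f.get? s = some [d]) :
    f.modify s [] (fun S => PySem.Set.add S d) = f := by
  have hg : f.getD s [] = [d] := by simp [PySem.Dict.getD_eq_get?_getD, h]
  have ha : PySem.Set.add ([d] : PySem.Set Int) d = [d] := PySem.Set.add_of_mem (by simp)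
  rw [PySem.Dict.modify, hg, ha]
  exact insert_same f s [d] hnd h

lemma modify_fresh (f : PySem.Dict Int (PySem.Set Int)) (s d : Int)
    (h : f.get? s = none) :
    (f.modify s [] (fun S => PySem.Set.add S d)).items = f.items ++ [(s, [d])] := by
  have hg : f.getD s [] = [] := by simp [PySem.Dict.getD_eq_get?_getD, h]
  have ha : PySem.Set.add ([] : PySem.Set Int) d = [d] := PySem.Set.add_of_not_mem (by simp)
  have hc : f.contains s = false := by
    rw [PySem.Dict.contains_eq_isSome_get?, h]; rfl
  rw [PySem.Dict.modify, hg, ha]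
  exact PySem.Dict.items_insert_of_not_contains _ _ hc

lemma sq_step_comp (f : PySem.Dict Int (PySem.Set Int)) (s d : Int)
    (hnd : f.keys.Nodup) (h : f.get? s = none ∨ f.get? s = some [d]) :
    pvSq (f.modify s [] (fun S => PySem.Set.add S d)) = (pvSq f).insert s d := by
  rcases h with h | h
  · have hc : (pvSq f).contains s = false := by
      rw [PySem.Dict.contains_eq_isSome_get?, sq_get?, h]; rfl
    apply PySem.Dict.ext
    rw [PySem.Dict.items_insert_of_not_contains _ _ hc]
    show ((f.modify s [] (fun S => PySem.Set.add S d)).items.map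
      (fun p => (p.1, p.2.headD 0))) = _
    rw [modify_fresh f s d h, List.map_append]
    rfl
  · rw [modify_same f s d hnd h]
    have : (pvSq f).get? s = some d := by rw [sq_get?, h]; rfl
    rw [insert_same _ _ _ (by rw [sq_keys]; exact hnd) this]

lemma get?_values (f : PySem.Dict Int (PySem.Set Int)) {s : Int} {S : PySem.Set Int}
    (hf : f.get? s = some S) : S ∈ f.values := by
  have hm := PySem.Dict.mem_items_of_get?_eq_some (d := f) hf
  simp only [PySem.Dict.values, List.mem_map]
  exact ⟨(s, S), hm, rfl⟩

lemma okB_len1 (fb : PySem.Dict Int (PySem.Set Int) × PySem.Dict Int (PySem.Set Int))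
    (hok : pvOkB fb = true) :
    (∀ S ∈ fb.1.values, S.length ≤ 1) ∧ (∀ S ∈ fb.2.values, S.length ≤ 1) := by
  simp only [pvOkB, Bool.not_eq_eq_eq_not, Bool.not_true, Bool.or_eq_false_iff,
    List.any_eq_false, decide_eq_true_eq] at hok
  exact ⟨fun S hS => Nat.le_of_not_lt (hok.1 S hS), fun S hS => Nat.le_of_not_lt (hok.2 S hS)⟩

lemma singleton_of (S : PySem.Set Int) (hne : S ≠ []) (hlen : S.length ≤ 1) :
    ∃ v, S = [v] := by
  cases S with
  | nil => exact absurd rfl hne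
  | cons a l =>
    cases l with
    | nil => exact ⟨a, rfl⟩
    | cons b t => simp at hlen

lemma lift_mm1 (fb : PySem.Dict Int (PySem.Set Int) × PySem.Dict Int (PySem.Set Int))
    (s d t x : Int) (hx : x ∈ fb.1.getD t []) : x ∈ (pvMMStep fb s d).1.getD t [] := by
  rw [getD_mmStep1]
  by_cases ht : t = s
  · subst ht; rw [if_pos rfl]; exact (PySem.Set.mem_add _ _ _).mpr (Or.inl hx)
  · rwa [if_neg ht]

lemma lift_mm2 (fb : PySem.Dict Int (PySem.Set Int) × PySem.Dict Int (PySem.Set Int))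
    (s d t x : Int) (hx : x ∈ fb.2.getD t []) : x ∈ (pvMMStep fb s d).2.getD t [] := by
  rw [getD_mmStep2]
  by_cases ht : t = d
  · subst ht; rw [if_pos rfl]; exact (PySem.Set.mem_add _ _ _).mpr (Or.inl hx)
  · rwa [if_neg ht]

-- the heart: one A-step tracks one B-step through the abstraction
lemma abs_step (fb : PySem.Dict Int (PySem.Set Int) × PySem.Dict Int (PySem.Set Int))
    (s d : Int) (h : pvWF fb) :
    (pvAbs fb).bind (fun st => pvStepA st s d) = pvAbs (pvMMStep fb s d) := by
  have hwf' := wf_mmStep fb s d h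
  by_cases hok : pvOkB fb = true
  · have hinj := (okB_iff fb h).mp hok
    have hlen := okB_len1 fb hok
    have habs : pvAbs fb = some (pvSq fb.1, pvSq fb.2) := by simp [pvAbs, hok]
    rw [habs]
    have shape : ∀ (f : PySem.Dict Int (PySem.Set Int)) (hk : pvWFd f)
        (hl : ∀ S ∈ f.values, S.length ≤ 1) (a : Int),
        f.get? a = none ∨ ∃ v, f.get? a = some [v] := by
      intro f hk hl a
      cases hf : f.get? a with
      | none => exact Or.inl rfl
      | some S =>
        exact Or.inr ((singleton_of S (hk.2 S (get?_values f hf)).1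
          (hl S (get?_values f hf))).imp (fun v hv => by rw [hv]))
    -- abbreviations
    have hgetD1 : ∀ v, fb.1.get? s = some [v] → fb.1.getD s [] = [v] := by
      intro v hv; simp [PySem.Dict.getD_eq_get?_getD, hv]
    have hgetD2 : ∀ u, fb.2.get? d = some [u] → fb.2.getD d [] = [u] := by
      intro u hu; simp [PySem.Dict.getD_eq_get?_getD, hu]
    have hnone1 : fb.1.get? s = none → fb.1.getD s [] = [] := by
      intro hv; simp [PySem.Dict.getD_eq_get?_getD, hv]
    have hnone2 : fb.2.get? d = none → fb.2.getD d [] = [] := by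
      intro hu; simp [PySem.Dict.getD_eq_get?_getD, hu]
    -- conflict helpers: produce the RHS none
    have rhs_none1 : ∀ v, fb.1.get? s = some [v] → v ≠ d → pvAbs (pvMMStep fb s d) = none := by
      intro v hv hvd
      have hxd : d ∈ (pvMMStep fb s d).1.getD s [] := by
        rw [getD_mmStep1, if_pos rfl]
        exact (PySem.Set.mem_add _ _ _).mpr (Or.inr rfl)
      have hxv : v ∈ (pvMMStep fb s d).1.getD s [] :=
        lift_mm1 fb s d s v (by rw [hgetD1 v hv]; simp)
      have hko : pvOkB (pvMMStep fb s d) = false := by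
        cases hx : pvOkB (pvMMStep fb s d) with
        | false => rfl
        | true => exact absurd (((okB_iff _ hwf').mp hx).1 s v d hxv hxd) hvd
      simp [pvAbs, hko]
    have rhs_none2 : ∀ u, fb.2.get? d = some [u] → u ≠ s → pvAbs (pvMMStep fb s d) = none := by
      intro u hu hus
      have hxs : s ∈ (pvMMStep fb s d).2.getD d [] := by
        rw [getD_mmStep2, if_pos rfl]
        exact (PySem.Set.mem_add _ _ _).mpr (Or.inr rfl)
      have hxu : u ∈ (pvMMStep fb s d).2.getD d [] :=
        lift_mm2 fb s d d u (by rw [hgetD2 u hu]; simp)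
      have hko : pvOkB (pvMMStep fb s d) = false := by
        cases hx : pvOkB (pvMMStep fb s d) with
        | false => rfl
        | true => exact absurd (((okB_iff _ hwf').mp hx).2 d u s hxu hxs) hus
      simp [pvAbs, hko]
    -- pass helper: both sides compatible
    have pass : (fb.1.get? s = none ∨ fb.1.get? s = some [d]) →
        (fb.2.get? d = none ∨ fb.2.get? d = some [s]) →
        pvAbs (pvMMStep fb s d) = some ((pvSq fb.1).insert s d, (pvSq fb.2).insert d s) := by
      intro hF hG
      have hinj1' : pvInj (pvMMStep fb s d).1 := by
        intro t x y hx hy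
        rw [getD_mmStep1] at hx hy
        by_cases ht : t = s
        · rw [if_pos ht] at hx hy
          have hb : fb.1.getD s [] = [] ∨ fb.1.getD s [] = [d] := by
            rcases hF with hF | hF
            · exact Or.inl (hnone1 hF)
            · exact Or.inr (hgetD1 d hF)
          rcases hb with hb | hb <;>
            rw [hb] at hx hy <;>
            simp at hx hy <;> omega
        · rw [if_neg ht] at hx hy
          exact hinj.1 t x y hx hy
      have hinj2' : pvInj (pvMMStep fb s d).2 := by
        intro t x y hx hy
        rw [getD_mmStep2] at hx hy
        by_cases ht : t = d
        · rw [if_pos ht] at hx hy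
          have hb : fb.2.getD d [] = [] ∨ fb.2.getD d [] = [s] := by
            rcases hG with hG | hG
            · exact Or.inl (hnone2 hG)
            · exact Or.inr (hgetD2 s hG)
          rcases hb with hb | hb <;>
            rw [hb] at hx hy <;>
            simp at hx hy <;> omega
        · rw [if_neg ht] at hx hy
          exact hinj.2 t x y hx hy
      have hko : pvOkB (pvMMStep fb s d) = true := (okB_iff _ hwf').mpr ⟨hinj1', hinj2'⟩
      have e1 := sq_step_comp fb.1 s d h.1.1 hF
      have e2 := sq_step_comp fb.2 d s h.2.1 hG
      simp only [pvAbs, hko, if_pos]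
      rw [show (pvMMStep fb s d).1 = fb.1.modify s [] (fun S => PySem.Set.add S d) from rfl,
        show (pvMMStep fb s d).2 = fb.2.modify d [] (fun S => PySem.Set.add S s) from rfl,
        e1, e2]
    rcases shape fb.1 h.1 hlen.1 s with hf | ⟨v, hf⟩
    · rcases shape fb.2 h.2 hlen.2 d with hg | ⟨u, hg⟩
      · rw [pass (Or.inl hf) (Or.inl hg)]
        simp [pvStepA, sq_get?, hf, hg]
      · by_cases hus : u = s
        · rw [hus] at hg
          rw [pass (Or.inl hf) (Or.inr hg)]
          simp [pvStepA, sq_get?, hf, hg]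
        · rw [rhs_none2 u hg hus]
          simp [pvStepA, sq_get?, hf, hg, hus]
    · by_cases hvd : v = d
      · rw [hvd] at hf
        rcases shape fb.2 h.2 hlen.2 d with hg | ⟨u, hg⟩
        · rw [pass (Or.inr hf) (Or.inl hg)]
          simp [pvStepA, sq_get?, hf, hg]
        · by_cases hus : u = s
          · rw [hus] at hg
            rw [pass (Or.inr hf) (Or.inr hg)]
            simp [pvStepA, sq_get?, hf, hg]
          · rw [rhs_none2 u hg hus]
            simp [pvStepA, sq_get?, hf, hg, hus]
      · rw [rhs_none1 v hf hvd]
        simp [pvStepA, sq_get?, hf, hvd]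
  · have hfb : pvAbs fb = none := by simp [pvAbs, hok]
    have hstep : pvOkB (pvMMStep fb s d) = false := by
      cases hx : pvOkB (pvMMStep fb s d) with
      | false => rfl
      | true =>
        exfalso
        have hi := (okB_iff _ hwf').mp hx
        apply hok
        rw [okB_iff fb h]
        exact ⟨fun t x y a b => hi.1 t x y (lift_mm1 fb s d t x a) (lift_mm1 fb s d t y b),
               fun t x y a b => hi.2 t x y (lift_mm2 fb s d t x a) (lift_mm2 fb s d t y b)⟩
    rw [hfb]
    simp [pvAbs, hstep]

lemma pvA_abs (qs : List (Int × Int)) : ∀ ps : List (Int × Int),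
    pvA qs (pvAbs (pvM ps pvE)) = pvAbs (pvM (ps ++ qs) pvE) := by
  induction qs with
  | nil => intro ps; simp [pvA]
  | cons c qs ih =>
    intro ps
    have h1 : pvA (c :: qs) (pvAbs (pvM ps pvE)) =
        pvA qs ((pvAbs (pvM ps pvE)).bind (fun st => pvStepA st c.1 c.2)) := rfl
    rw [h1, abs_step _ c.1 c.2 (wf_mm ps)]
    have h2 : pvMMStep (pvM ps pvE) c.1 c.2 = pvM (ps ++ [c]) pvE := by
      rw [pvM_append]; rfl
    rw [h2, ih (ps ++ [c])]
    have : ps ++ [c] ++ qs = ps ++ c :: qs := by simp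
    rw [this]

lemma stepA_guards (st : PySem.Dict Int Int × PySem.Dict Int Int) (s d : Int)
    (st' : PySem.Dict Int Int × PySem.Dict Int Int) (h : pvStepA st s d = some st') :
    (∀ v, st.1.get? s = some v → v = d) ∧ (∀ u, st.2.get? d = some u → u = s) := by
  simp only [pvStepA] at h
  split_ifs at h with h1 h2
  constructor
  · intro v hv
    rw [hv] at h1
    simpa using h1
  · intro u hu
    rw [hu] at h2
    simpa using h2

-- A-state bookkeeping
lemma stepA_some (st st' : PySem.Dict Int Int × PySem.Dict Int Int) (s d : Int)
    (h : pvStepA st s d = some st') :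
    st' = (st.1.insert s d, st.2.insert d s) := by
  simp only [pvStepA] at h
  split_ifs at h
  injection h with h
  exact h.symm

lemma pvA_nodup (ps : List (Int × Int)) :
    ∀ st0 st, pvA ps (some st0) = some st →
      st0.1.keys.Nodup → st0.2.keys.Nodup → st.1.keys.Nodup ∧ st.2.keys.Nodup := by
  induction ps with
  | nil =>
    intro st0 st h h1 h2
    cases h
    exact ⟨h1, h2⟩
  | cons c ps ih =>
    intro st0 st h h1 h2
    have hh : pvA ps (pvStepA st0 c.1 c.2) = some st := h
    cases hs : pvStepA st0 c.1 c.2 with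
    | none => rw [hs, pvA_none] at hh; cases hh
    | some st1 =>
      rw [hs] at hh
      rw [stepA_some st0 st1 c.1 c.2 hs] at hh
      exact ih _ _ hh (PySem.Dict.nodup_keys_insert _ _ _ h1)
        (PySem.Dict.nodup_keys_insert _ _ _ h2)

lemma pvA_persist (ps : List (Int × Int)) :
    ∀ st0 st, pvA ps (some st0) = some st → ∀ s d,
      st0.1.get? s = some d → st0.2.get? d = some s →
      st.1.get? s = some d ∧ st.2.get? d = some s := by
  induction ps with
  | nil =>
    intro st0 st h s d h1 h2
    cases h
    exact ⟨h1, h2⟩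
  | cons c ps ih =>
    intro st0 st h s d h1 h2
    have hh : pvA ps (pvStepA st0 c.1 c.2) = some st := h
    cases hs : pvStepA st0 c.1 c.2 with
    | none => rw [hs, pvA_none] at hh; cases hh
    | some st1 =>
      rw [hs] at hh
      have hg := stepA_guards st0 c.1 c.2 st1 hs
      have he := stepA_some st0 st1 c.1 c.2 hs
      refine ih _ _ hh s d ?_ ?_
      · rw [he]
        by_cases hsc : s = c.1
        · rw [hsc] at h1 ⊢
          have hdc := hg.1 d h1
          rw [hdc]
          exact PySem.Dict.get?_insert_self _ _ _
        · rw [PySem.Dict.get?_insert_of_ne _ _ hsc]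
          exact h1
      · rw [he]
        by_cases hdc : d = c.2
        · rw [hdc] at h2 ⊢
          have hsc := hg.2 s h2
          rw [hsc]
          exact PySem.Dict.get?_insert_self _ _ _
        · rw [PySem.Dict.get?_insert_of_ne _ _ hdc]
          exact h2

lemma pvA_mem (ps : List (Int × Int)) :
    ∀ st0 st, pvA ps (some st0) = some st → ∀ c ∈ ps,
      st.1.get? c.1 = some c.2 ∧ st.2.get? c.2 = some c.1 := by
  induction ps with
  | nil => intro st0 st h c hc; cases hc
  | cons c0 ps ih =>
    intro st0 st h c hc
    have hh : pvA ps (pvStepA st0 c0.1 c0.2) = some st := h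
    cases hs : pvStepA st0 c0.1 c0.2 with
    | none => rw [hs, pvA_none] at hh; cases hh
    | some st1 =>
      rw [hs] at hh
      rcases List.mem_cons.mp hc with hc0 | hmem
      · subst hc0
        have he := stepA_some st0 st1 c.1 c.2 hs
        refine pvA_persist ps st1 st hh c.1 c.2 ?_ ?_
        · rw [he]; exact PySem.Dict.get?_insert_self _ _ _
        · rw [he]; exact PySem.Dict.get?_insert_self _ _ _
      · exact ih _ _ hh c hmem

lemma pvA_dedup (ps : List (Int × Int)) (st0 : PySem.Dict Int Int × PySem.Dict Int Int)
    (h1 : st0.1.keys.Nodup) (h2 : st0.2.keys.Nodup) :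
    pvA (PySem.Set.ofList ps) (some st0) = pvA ps (some st0) := by
  induction ps using List.reverseRecOn with
  | nil => rfl
  | append_singleton ps c ih =>
    rw [PySem.Set.ofList_append_singleton]
    by_cases hc : c ∈ ps
    · rw [PySem.Set.add_of_mem (by rw [PySem.Set.mem_ofList]; exact hc), ih, pvA_append]
      cases hst : pvA ps (some st0) with
      | none => rfl
      | some st =>
        have hm := pvA_mem ps st0 st hst c hc
        have hn := pvA_nodup ps st0 st hst h1 h2
        have : pvStepA st c.1 c.2 = some st := by
          simp only [pvStepA, hm.1, hm.2]
          rw [if_neg (by simp), if_neg (by simp)]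
          rw [insert_same _ _ _ hn.1 hm.1, insert_same _ _ _ hn.2 hm.2]
        show some st = (some st).bind (fun st => pvStepA st c.1 c.2)
        simpa using this.symm
    · rw [PySem.Set.add_of_not_mem (by rw [PySem.Set.mem_ofList]; exact hc),
        pvA_append, pvA_append, ih]

-- the items of a validated local map are exactly the deduplicated cell stream
lemma getD_pvE1 (s : Int) : (pvE.1.getD s []) = [] := by
  simp [pvE, PySem.Dict.getD_eq_get?_getD, PySem.Dict.get?_empty]

lemma getD_pvE2 (s : Int) : (pvE.2.getD s []) = [] := by
  simp [pvE, PySem.Dict.getD_eq_get?_getD, PySem.Dict.get?_empty]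

lemma mm_mem_of_get?1 (ps : List (Int × Int)) {s : Int} {S : PySem.Set Int}
    (hf : (pvM ps pvE).1.get? s = some S) {x : Int} (hx : x ∈ S) : (s, x) ∈ ps := by
  have : x ∈ (pvM ps pvE).1.getD s [] := by
    rw [PySem.Dict.getD_eq_get?_getD, hf]; exact hx
  rw [mem_mm1, getD_pvE1] at this
  rcases this with h0 | h0
  · cases h0
  · exact h0

lemma mm_mem_of_get?2 (ps : List (Int × Int)) {d : Int} {T : PySem.Set Int}
    (hg : (pvM ps pvE).2.get? d = some T) {x : Int} (hx : x ∈ T) : (x, d) ∈ ps := by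
  have : x ∈ (pvM ps pvE).2.getD d [] := by
    rw [PySem.Dict.getD_eq_get?_getD, hg]; exact hx
  rw [mem_mm2, getD_pvE2] at this
  rcases this with h0 | h0
  · cases h0
  · exact h0

-- if a pair's cell stream is consistent, re-processing it is the identity step;
-- the second component is the matching inverse entry
lemma bk_entry (ps : List (Int × Int)) (hok : pvOkB (pvM ps pvE) = true)
    {s d : Int} (hmem : (s, d) ∈ ps) : (pvM ps pvE).2.get? d = some [s] := by
  have hwf := wf_mm ps
  have hb : s ∈ (pvM ps pvE).2.getD d [] := by
    rw [mem_mm2, getD_pvE2]; right; exact hmem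
  cases hT : (pvM ps pvE).2.get? d with
  | none => rw [PySem.Dict.getD_eq_get?_getD, hT] at hb; cases hb
  | some T =>
    rw [PySem.Dict.getD_eq_get?_getD, hT] at hb
    obtain ⟨u, hu⟩ := singleton_of T (hwf.2.2 T (get?_values _ hT)).1
      ((okB_len1 _ hok).2 T (get?_values _ hT))
    rw [hu] at hb
    have hs : s = u := by simpa using hb
    rw [hu, ← hs]

lemma fw_entry (ps : List (Int × Int)) (hok : pvOkB (pvM ps pvE) = true)
    {s d : Int} (hmem : (s, d) ∈ ps) : (pvM ps pvE).1.get? s = some [d] := by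
  have hwf := wf_mm ps
  have hb : d ∈ (pvM ps pvE).1.getD s [] := by
    rw [mem_mm1, getD_pvE1]; right; exact hmem
  cases hT : (pvM ps pvE).1.get? s with
  | none => rw [PySem.Dict.getD_eq_get?_getD, hT] at hb; cases hb
  | some T =>
    rw [PySem.Dict.getD_eq_get?_getD, hT] at hb
    obtain ⟨u, hu⟩ := singleton_of T (hwf.1.2 T (get?_values _ hT)).1
      ((okB_len1 _ hok).1 T (get?_values _ hT))
    rw [hu] at hb
    have hs : d = u := by simpa using hb
    rw [hu, ← hs]

lemma sq_items_ofList (cs : List (Int × Int)) (h : pvOkB (pvM cs pvE) = true) :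
    (pvSq (pvM cs pvE).1).items = PySem.Set.ofList cs := by
  revert h
  induction cs using List.reverseRecOn with
  | nil => intro _; rfl
  | append_singleton ps c ih =>
    intro hok'
    have hok : pvOkB (pvM ps pvE) = true :=
      ok_mono_mem ps (ps ++ [c]) (fun x hx => List.mem_append_left _ hx) hok'
    have hstep : pvM (ps ++ [c]) pvE = pvMMStep (pvM ps pvE) c.1 c.2 := by
      rw [pvM_append]; rfl
    have hwf := wf_mm ps
    have hwf' := wf_mm (ps ++ [c])
    cases hf : (pvM ps pvE).1.get? c.1 with
    | none =>
      have hcnot : c ∉ ps := by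
        intro hcmem
        have : (pvM ps pvE).1.get? c.1 = some [c.2] :=
          fw_entry ps hok (by simpa using hcmem)
        rw [hf] at this
        cases this
      have hset : (pvSq (pvM (ps ++ [c]) pvE).1).items =
          (pvSq (pvM ps pvE).1).items ++ [(c.1, c.2)] := by
        rw [hstep]
        show ((pvM ps pvE).1.modify c.1 [] (fun S => PySem.Set.add S c.2)).items.map
          (fun p => (p.1, p.2.headD 0)) = _
        rw [modify_fresh _ _ _ hf, List.map_append]
        rfl
      rw [hset, ih hok, PySem.Set.ofList_append_singleton,
        PySem.Set.add_of_not_mem (by rw [PySem.Set.mem_ofList]; exact hcnot)]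
    | some S =>
      have hlen := okB_len1 _ hok
      obtain ⟨v, hv⟩ := singleton_of S (hwf.1.2 S (get?_values _ hf)).1
        (hlen.1 S (get?_values _ hf))
      rw [hv] at hf
      have hinj' := (okB_iff _ hwf').mp hok'
      have hvm : v ∈ (pvM ps pvE).1.getD c.1 [] := by
        rw [PySem.Dict.getD_eq_get?_getD, hf]; simp
      have hvmem : v ∈ (pvM (ps ++ [c]) pvE).1.getD c.1 [] := by
        rw [mem_mm1] at hvm ⊢
        rcases hvm with h0 | h0
        · rw [getD_pvE1] at h0; cases h0
        · right; exact List.mem_append_left _ h0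
      have hdmem : c.2 ∈ (pvM (ps ++ [c]) pvE).1.getD c.1 [] := by
        rw [mem_mm1]; right; apply List.mem_append_right; simp
      have hvc : v = c.2 := hinj'.1 c.1 v c.2 hvmem hdmem
      rw [hvc] at hf
      have hpsmem : (c.1, c.2) ∈ ps := mm_mem_of_get?1 ps hf (by simp)
      have hT := bk_entry ps hok hpsmem
      have hM : pvM (ps ++ [c]) pvE = pvM ps pvE := by
        rw [hstep]
        show ((pvM ps pvE).1.modify c.1 [] (fun S => PySem.Set.add S c.2),
          (pvM ps pvE).2.modify c.2 [] (fun S => PySem.Set.add S c.1)) = _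
        rw [modify_same _ _ _ hwf.1.1 hf, modify_same _ _ _ hwf.2.1 hT]
      rw [hM, ih hok, PySem.Set.ofList_append_singleton,
        PySem.Set.add_of_mem (by rw [PySem.Set.mem_ofList]; simpa using hpsmem)]

-- the recomputed inverse is the squashed backward multimap
lemma inv_transpose (cs : List (Int × Int)) (h : pvOkB (pvM cs pvE) = true) :
    pvInvOf (pvSq (pvM cs pvE).1) = pvSq (pvM cs pvE).2 := by
  revert h
  induction cs using List.reverseRecOn with
  | nil => intro _; rfl
  | append_singleton ps c ih =>
    intro hok'
    have hok : pvOkB (pvM ps pvE) = true :=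
      ok_mono_mem ps (ps ++ [c]) (fun x hx => List.mem_append_left _ hx) hok'
    have hstep : pvM (ps ++ [c]) pvE = pvMMStep (pvM ps pvE) c.1 c.2 := by
      rw [pvM_append]; rfl
    have hwf := wf_mm ps
    have hwf' := wf_mm (ps ++ [c])
    cases hf : (pvM ps pvE).1.get? c.1 with
    | some S =>
      have hlen := okB_len1 _ hok
      obtain ⟨v, hv⟩ := singleton_of S (hwf.1.2 S (get?_values _ hf)).1
        (hlen.1 S (get?_values _ hf))
      rw [hv] at hf
      have hinj' := (okB_iff _ hwf').mp hok'
      have hvm : v ∈ (pvM ps pvE).1.getD c.1 [] := by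
        rw [PySem.Dict.getD_eq_get?_getD, hf]; simp
      have hvmem : v ∈ (pvM (ps ++ [c]) pvE).1.getD c.1 [] := by
        rw [mem_mm1] at hvm ⊢
        rcases hvm with h0 | h0
        · rw [getD_pvE1] at h0; cases h0
        · right; exact List.mem_append_left _ h0
      have hdmem : c.2 ∈ (pvM (ps ++ [c]) pvE).1.getD c.1 [] := by
        rw [mem_mm1]; right; apply List.mem_append_right; simp
      have hvc : v = c.2 := hinj'.1 c.1 v c.2 hvmem hdmem
      rw [hvc] at hf
      have hpsmem : (c.1, c.2) ∈ ps := mm_mem_of_get?1 ps hf (by simp)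
      have hT := bk_entry ps hok hpsmem
      have hM : pvM (ps ++ [c]) pvE = pvM ps pvE := by
        rw [hstep]
        show ((pvM ps pvE).1.modify c.1 [] (fun S => PySem.Set.add S c.2),
          (pvM ps pvE).2.modify c.2 [] (fun S => PySem.Set.add S c.1)) = _
        rw [modify_same _ _ _ hwf.1.1 hf, modify_same _ _ _ hwf.2.1 hT]
      rw [hM]
      exact ih hok
    | none =>
      have hcnot : ∀ x, (c.1, x) ∉ ps := by
        intro x hx
        have := fw_entry ps hok hx
        rw [hf] at this
        cases this
      have hg : (pvM ps pvE).2.get? c.2 = none := by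
        cases hg : (pvM ps pvE).2.get? c.2 with
        | none => rfl
        | some T =>
          exfalso
          obtain ⟨u, hu⟩ := singleton_of T (hwf.2.2 T (get?_values _ hg)).1
            ((okB_len1 _ hok).2 T (get?_values _ hg))
          rw [hu] at hg
          have hup : (u, c.2) ∈ ps := mm_mem_of_get?2 ps hg (by simp)
          have hne : u ≠ c.1 := fun he => hcnot c.2 (he ▸ hup)
          have hinj' := (okB_iff _ hwf').mp hok'
          have hu1 : u ∈ (pvM (ps ++ [c]) pvE).2.getD c.2 [] := by
            rw [mem_mm2, getD_pvE2]
            right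
            exact List.mem_append_left _ hup
          have hu2 : c.1 ∈ (pvM (ps ++ [c]) pvE).2.getD c.2 [] := by
            rw [mem_mm2, getD_pvE2]
            right
            apply List.mem_append_right
            simp
          exact hne (hinj'.2 c.2 u c.1 hu1 hu2)
      have hits1 : (pvSq (pvM (ps ++ [c]) pvE).1).items =
          (pvSq (pvM ps pvE).1).items ++ [(c.1, c.2)] := by
        rw [hstep]
        show ((pvM ps pvE).1.modify c.1 [] (fun S => PySem.Set.add S c.2)).items.map
          (fun p => (p.1, p.2.headD 0)) = _
        rw [modify_fresh _ _ _ hf, List.map_append]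
        rfl
      have hits2 : (pvSq (pvM (ps ++ [c]) pvE).2).items =
          (pvSq (pvM ps pvE).2).items ++ [(c.2, c.1)] := by
        rw [hstep]
        show ((pvM ps pvE).2.modify c.2 [] (fun S => PySem.Set.add S c.1)).items.map
          (fun p => (p.1, p.2.headD 0)) = _
        rw [modify_fresh _ _ _ hg, List.map_append]
        rfl
      have hinv : pvInvOf (pvSq (pvM (ps ++ [c]) pvE).1) =
          (pvInvOf (pvSq (pvM ps pvE).1)).insert c.2 c.1 := by
        simp only [pvInvOf]
        rw [hits1, List.foldl_append]
        rfl
      rw [hinv, ih hok]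
      have hc : (pvSq (pvM ps pvE).2).contains c.2 = false := by
        rw [PySem.Dict.contains_eq_isSome_get?, sq_get?, hg]; rfl
      apply PySem.Dict.ext
      rw [PySem.Dict.items_insert_of_not_contains _ _ hc, hits2]

-- the ports' nested loops, as stream folds
lemma infer_eq (src dst : List (List Int)) :
    infer_bijective_palette_map src dst =
      if pvDims src = pvDims dst then
        (pvA (pvCells src dst) (some (PySem.Dict.empty, PySem.Dict.empty))).map
          (fun st => st.1)
      else none := by
  by_cases hd : pvDims src = pvDims dst
  · rw [if_pos hd]
    simp only [infer_bijective_palette_map]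
    rw [if_neg (by simp [hd])]
    congr 1
    rw [pvA, pvCells, List.foldl_flatMap]
    simp only [List.foldl_map]
  · rw [if_neg hd]
    simp only [infer_bijective_palette_map]
    rw [if_pos hd]

lemma scan_eq (src dst : List (List Int))
    (fb : PySem.Dict Int (PySem.Set Int) × PySem.Dict Int (PySem.Set Int)) :
    (PySem.List.pyRange 0 (pvDims src).1 1).foldl (fun fb2 r =>
        (PySem.List.pyRange 0 (pvDims src).2 1).foldl (fun fb3 c =>
          pvMMStep fb3 (pvCell src r c) (pvCell dst r c)) fb2) fb =
      pvM (pvCells src dst) fb := by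
  rw [pvM, pvCells, List.foldl_flatMap]
  simp only [List.foldl_map]

lemma merge_eq (g l : PySem.Dict Int Int) :
    merge_palette_maps g l =
      (pvA l.items (some (g, pvInvOf g))).map (fun st => st.1) := by
  rfl

lemma fitA_eq (tp : List (List (List Int) × List (List Int))) :
    fit_palette_only tp =
      (tp.foldl pvStepAO (some PySem.Dict.empty)).map (fun g => g.items) := by
  rfl

lemma fitB_eq (tp : List (List (List Int) × List (List Int))) :
    fit_palette_only_alt tp =
      (pvPost (tp.foldl pvStepBO (some pvE))).map (fun g => g.items) := by
  have hfun : (fun (acc : Option (PySem.Dict Int (PySem.Set Int) × PySem.Dict Int (PySem.Set Int)))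
      (p : List (List Int) × List (List Int)) =>
      acc.bind (fun fb =>
        if pvDims p.1 ≠ pvDims p.2 then none
        else some ((PySem.List.pyRange 0 (pvDims p.1).1 1).foldl (fun fb2 r =>
            (PySem.List.pyRange 0 (pvDims p.1).2 1).foldl (fun fb3 c =>
              pvMMStep fb3 (pvCell p.1 r c) (pvCell p.2 r c)) fb2) fb))) = pvStepBO := by
    funext acc p
    simp only [pvStepBO]
    congr 1
    funext fb
    by_cases hd : pvDims p.1 = pvDims p.2
    · rw [if_neg (by simp [hd]), if_neg (by simp [hd]), scan_eq]
    · rw [if_pos hd, if_pos hd]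
  simp only [fit_palette_only_alt]
  rw [hfun]
  have hpe : (some pvE : Option (PySem.Dict Int (PySem.Set Int) × PySem.Dict Int (PySem.Set Int))) =
      some (PySem.Dict.empty, PySem.Dict.empty) := rfl
  rw [hpe]
  cases h : tp.foldl pvStepBO (some (PySem.Dict.empty, PySem.Dict.empty)) with
  | none => rfl
  | some fb =>
    by_cases hc : (fb.1.values.any (fun v => 1 < v.length) ||
        fb.2.values.any (fun v => 1 < v.length)) = true
    · have hok : pvOkB fb = false := by simp [pvOkB, hc]
      simp [hc, pvPost, hok]
    · have hok : pvOkB fb = true := by simp [pvOkB]; simpa using hc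
      simp only [Bool.not_eq_true] at hc
      simp [hc, pvPost, hok, pvSq]

lemma absF_nil : pvAbsF [] = some PySem.Dict.empty := by
  rfl

lemma foldl_AO_none (tp : List (List (List Int) × List (List Int))) :
    tp.foldl pvStepAO none = none := by
  induction tp with
  | nil => rfl
  | cons p tp ih => simpa [pvStepAO] using ih

lemma foldl_BO_none (tp : List (List (List Int) × List (List Int))) :
    tp.foldl pvStepBO none = none := by
  induction tp with
  | nil => rfl
  | cons p tp ih => simpa [pvStepBO] using ih

lemma absF_mono (ps qs : List (Int × Int)) (h : pvAbsF ps = none) :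
    pvAbsF (ps ++ qs) = none := by
  by_cases hok' : pvOkB (pvM (ps ++ qs) pvE) = true
  · have hok := ok_mono_mem ps (ps ++ qs) (fun x hx => List.mem_append_left _ hx) hok'
    simp [pvAbsF, pvAbs, hok] at h
  · simp [pvAbsF, pvAbs, hok']

lemma outer_main (tp : List (List (List Int) × List (List Int))) :
    ∀ ps : List (Int × Int),
      tp.foldl pvStepAO (pvAbsF ps) = pvPost (tp.foldl pvStepBO (some (pvM ps pvE))) := by
  induction tp with
  | nil =>
    intro ps
    show pvAbsF ps = pvPost (some (pvM ps pvE))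
    by_cases hok : pvOkB (pvM ps pvE) = true
    · simp [pvAbsF, pvAbs, pvPost, hok]
    · simp [pvAbsF, pvAbs, pvPost, hok]
  | cons p tp ih =>
    intro ps
    show tp.foldl pvStepAO (pvStepAO (pvAbsF ps) p) =
      pvPost (tp.foldl pvStepBO (pvStepBO (some (pvM ps pvE)) p))
    by_cases hd : pvDims p.1 = pvDims p.2
    · -- dims match: both sides process the pair's cell stream
      have hB : pvStepBO (some (pvM ps pvE)) p = some (pvM (ps ++ pvCells p.1 p.2) pvE) := by
        simp only [pvStepBO, Option.bind_some]
        rw [if_neg (by simp [hd]), pvM_append]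
      have hA : pvStepAO (pvAbsF ps) p = pvAbsF (ps ++ pvCells p.1 p.2) := by
        by_cases hok : pvOkB (pvM ps pvE) = true
        · have habs : pvAbs (pvM ps pvE) =
              some (pvSq (pvM ps pvE).1, pvSq (pvM ps pvE).2) := by
            simp [pvAbs, hok]
          have habsF : pvAbsF ps = some (pvSq (pvM ps pvE).1) := by
            simp [pvAbsF, habs]
          rw [habsF]
          simp only [pvStepAO, Option.bind_some]
          rw [infer_eq, if_pos hd]
          have h0 : pvAbs (pvM [] pvE) =
              some (PySem.Dict.empty, PySem.Dict.empty) := rfl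
          have hinf : pvA (pvCells p.1 p.2) (some (PySem.Dict.empty, PySem.Dict.empty)) =
              pvAbs (pvM (pvCells p.1 p.2) pvE) := by
            have := pvA_abs (pvCells p.1 p.2) []
            rw [h0] at this
            simpa using this
          by_cases hokc : pvOkB (pvM (pvCells p.1 p.2) pvE) = true
          · rw [hinf]
            simp only [pvAbs, hokc, if_pos, Option.map_some]
            rw [merge_eq, sq_items_ofList _ hokc, inv_transpose ps hok]
            have hnd := wf_mm ps
            rw [pvA_dedup (pvCells p.1 p.2)
              (pvSq (pvM ps pvE).1, pvSq (pvM ps pvE).2)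
              (by rw [sq_keys]; exact hnd.1.1) (by rw [sq_keys]; exact hnd.2.1)]
            rw [show (some (pvSq (pvM ps pvE).1, pvSq (pvM ps pvE).2)) =
              pvAbs (pvM ps pvE) from habs.symm]
            rw [pvA_abs]
            rfl
          · rw [hinf]
            have habsc : pvAbs (pvM (pvCells p.1 p.2) pvE) = none := by
              simp [pvAbs, hokc]
            rw [habsc]
            have : pvAbsF (ps ++ pvCells p.1 p.2) = none := by
              by_cases hok2 : pvOkB (pvM (ps ++ pvCells p.1 p.2) pvE) = true
              · exact absurd (ok_mono_mem (pvCells p.1 p.2) (ps ++ pvCells p.1 p.2)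
                  (fun x hx => List.mem_append_right _ hx) hok2) hokc
              · simp [pvAbsF, pvAbs, hok2]
            rw [this]
            rfl
        · have habsF : pvAbsF ps = none := by simp [pvAbsF, pvAbs, hok]
          rw [habsF, absF_mono ps (pvCells p.1 p.2) habsF]
          rfl
      rw [hA, hB]
      exact ih (ps ++ pvCells p.1 p.2)
    · -- dims mismatch: both sides collapse to none
      have hA : pvStepAO (pvAbsF ps) p = none := by
        cases hacc : pvAbsF ps with
        | none => rfl
        | some g =>
          simp only [pvStepAO, Option.bind_some]
          rw [infer_eq, if_neg hd]
      have hB : pvStepBO (some (pvM ps pvE)) p = none := by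
        simp only [pvStepBO, Option.bind_some]
        rw [if_pos hd]
      rw [hA, hB, foldl_AO_none, foldl_BO_none]
      rfl

-- ===== VERDICT (by name: the statement is the Claim_ definition above) =====
theorem fit_palette_only_spec : Claim_equal_fit_palette_only := by
  intro tp _ _
  unfold Spec_fit_palette_only
  rw [fitA_eq, fitB_eq]
  have h := outer_main tp []
  rw [absF_nil] at h
  rw [h]
  rfl
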